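-- pv_equiv track=rewrite | github.com/CathrinePaulsen/marco-repro | client/client/range_converter.py | create_range_spec
-- ===== SOURCE A (Python) =====
-- def create_range_spec_from_list(list):
--     """
--     Given a list of ComparableVersions, e.g. [1,2,3], return the corresponding range, i.e. [1,3]
--     :param list: list[ComparableVersion]
--     :return: str
--     """
--     lower_bound = str(list[0])
--     upper_bound = str(list[-1])
--     if lower_bound == upper_bound:
--         return "[" + lower_bound + "]"
--     return "[" + lower_bound + "," + upper_bound + "]"
--
-- def get_continuous_ranges(compatible_versions, available_versions):
--     """
--     Groups elements in compatible_versions that appear consecutively in available_versions.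
--     :param compatible_versions: list[ComparableVersion]
--     :param available_versions: list[ComparableVersion]
--     :return: list[ComparableVersion]
--     """
--     continuous_ranges = []
--     current_range = []
--
--     for av in available_versions:
--         if av in compatible_versions:
--             current_range.append(av)
--         elif current_range:
--             continuous_ranges.append(current_range)
--             current_range = []
--
--     if current_range:
--         continuous_ranges.append(current_range)
--
--     return continuous_ranges
--
-- def create_range_spec(compatible_versions, available_versions):
--     """
--     Creates a valid Maven range spec based on the given compatible and available versions.
--     :param compatible_versions: list[ComparableVersion]
--     :param available_versions: list[ComparableVersion]
--     :return: str representing the range spec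
--     """
--     if len(compatible_versions) == 0:
--         # If there are no compatible versions, then the compatible version range is empty.
--         return "[]"
--
--     continuous_ranges = get_continuous_ranges(compatible_versions, available_versions)
--
--     range_spec = ""
--     for cr in continuous_ranges:
--         range = create_range_spec_from_list(cr)
--         if not range_spec:
--             range_spec += range
--         else:
--             range_spec += "," + range
--
--     return range_spec
-- ===== SOURCE B (Python) =====
-- def _fmt(run):
--     first, last = run
--     if str(first) == str(last):
--         return "[" + str(first) + "]"
--     return "[" + str(first) + "," + str(last) + "]"
--
--
-- def _append(spec, piece):
--     return piece if not spec else spec + "," + piece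
--
--
-- def create_range_spec(compatible_versions, available_versions):
--     if len(compatible_versions) == 0:
--         return "[]"
--     spec = ""
--     run = None  # (first, last) of the current consecutive run, or None
--     for av in available_versions:
--         if av in compatible_versions:
--             run = (av, av) if run is None else (run[0], av)
--         elif run is not None:
--             spec = _append(spec, _fmt(run))
--             run = None
--     if run is not None:
--         spec = _append(spec, _fmt(run))
--     return spec
-- ===== Notes on version B (the rewrite author's own statement) =====
-- stated objective: simpler
-- what changed: Single fused scan keeping only the current run's (first,last) pair and emitting each range piece as soon as the run closes, instead of building a list of run-lists and then formatting it in a second pass.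
import Mathlib
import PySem

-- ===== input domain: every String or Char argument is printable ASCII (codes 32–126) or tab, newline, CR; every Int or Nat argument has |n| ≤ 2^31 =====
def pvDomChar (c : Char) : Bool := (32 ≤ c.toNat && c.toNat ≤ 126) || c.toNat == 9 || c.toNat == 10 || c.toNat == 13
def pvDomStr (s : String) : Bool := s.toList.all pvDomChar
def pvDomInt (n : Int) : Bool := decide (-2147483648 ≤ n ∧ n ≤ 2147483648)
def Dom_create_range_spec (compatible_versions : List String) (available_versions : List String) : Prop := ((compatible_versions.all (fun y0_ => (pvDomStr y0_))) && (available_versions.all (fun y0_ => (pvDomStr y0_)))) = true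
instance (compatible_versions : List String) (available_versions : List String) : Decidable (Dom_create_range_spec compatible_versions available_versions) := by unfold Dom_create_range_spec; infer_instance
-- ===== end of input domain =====

-- B fuses A's grouping pass and formatting pass into one scan that keeps only the
-- current run's (first,last) pair — simpler: no intermediate list of run lists.

-- ===== PORT A =====
-- create_range_spec_from_list: list[0]/list[-1] via pyGet? (getD "" is unreachable: callers pass nonempty runs)
def pvFmtList (l : List String) : String :=
  let lower_bound := (PySem.List.pyGet? l 0).getD ""
  let upper_bound := (PySem.List.pyGet? l (-1)).getD ""
  if lower_bound == upper_bound then "[" ++ lower_bound ++ "]"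
  else "[" ++ lower_bound ++ "," ++ upper_bound ++ "]"

-- get_continuous_ranges: fold carrying (continuous_ranges, current_range), then final flush
def pvGetContinuousRanges (compatible_versions : List String) (available_versions : List String) :
    List (List String) :=
  let s := available_versions.foldl
    (fun (s : List (List String) × List String) av =>
      if av ∈ compatible_versions then (s.1, s.2 ++ [av])
      else if s.2 ≠ [] then (s.1 ++ [s.2], []) else s)
    ([], [])
  if s.2 ≠ [] then s.1 ++ [s.2] else s.1

def create_range_spec (compatible_versions : List String) (available_versions : List String) : String :=
  if compatible_versions.length == 0 then "[]"
  else
    let continuous_ranges := pvGetContinuousRanges compatible_versions available_versions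
    continuous_ranges.foldl
      (fun range_spec cr =>
        let range := pvFmtList cr
        if range_spec == "" then range_spec ++ range else range_spec ++ "," ++ range)
      ""

-- ===== PORT B =====
def pvFmtRun (r : String × String) : String :=
  if r.1 == r.2 then "[" ++ r.1 ++ "]" else "[" ++ r.1 ++ "," ++ r.2 ++ "]"

def pvAppend (spec piece : String) : String :=
  if spec == "" then piece else spec ++ "," ++ piece

-- one step of B's fused scan
def pvStepB (compatible_versions : List String) (s : String × Option (String × String))
    (av : String) : String × Option (String × String) :=
  if av ∈ compatible_versions then
    match s.2 with
    | none => (s.1, some (av, av))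
    | some r => (s.1, some (r.1, av))
  else
    match s.2 with
    | some r => (pvAppend s.1 (pvFmtRun r), none)
    | none => s

def create_range_spec_alt (compatible_versions : List String) (available_versions : List String) : String :=
  if compatible_versions.length == 0 then "[]"
  else
    let s := available_versions.foldl (pvStepB compatible_versions) ("", none)
    match s.2 with
    | some r => pvAppend s.1 (pvFmtRun r)
    | none => s.1

-- ===== PRECONDITION & SPEC =====
def Spec_create_range_spec (compatible_versions : List String) (available_versions : List String) (out : String) : Prop := out = create_range_spec_alt compatible_versions available_versions
instance (compatible_versions : List String) (available_versions : List String) (out : String) : Decidable (Spec_create_range_spec compatible_versions available_versions out) := by unfold Spec_create_range_spec; infer_instance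

-- ===== CLAIM (what is proved, stated in full; the proofs are below) =====
def Claim_equal_create_range_spec : Prop := ∀ (compatible_versions : List String) (available_versions : List String), Dom_create_range_spec compatible_versions available_versions → Spec_create_range_spec compatible_versions available_versions (create_range_spec compatible_versions available_versions)

-- ===== LEMMAS AND PROOFS =====

-- A's formatting fold over the finished run lists
def pvFmtAll (crs : List (List String)) : String :=
  crs.foldl
    (fun range_spec cr =>
      let range := pvFmtList cr
      if range_spec == "" then range_spec ++ range else range_spec ++ "," ++ range)
    ""

-- B's run mirrors A's current_range: none ↔ [], otherwise (head, last)
def pvRunOf (cur : List String) : Option (String × String) :=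
  match cur with
  | [] => none
  | x :: xs => some (x, (x :: xs).getLast (by simp))

lemma pvFmtList_eq_fmtRun (x : String) (xs : List String) :
    pvFmtList (x :: xs) = pvFmtRun (x, (x :: xs).getLast (by simp)) := by
  have h0 : PySem.List.pyGet? (x :: xs) 0 = some x := by
    simp [PySem.List.pyGet?, PySem.List.pyIdx?]
  have h1 : PySem.List.pyGet? (x :: xs) (-1) = some ((x :: xs).getLast (by simp)) := by
    simp [PySem.List.pyGet?, PySem.List.pyIdx?]
    exact List.getElem_cons_length rfl
  simp [pvFmtList, pvFmtRun, h1]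

lemma pvFmtAll_concat (crs : List (List String)) (c : List String) :
    pvFmtAll (crs ++ [c]) = pvAppend (pvFmtAll crs) (pvFmtList c) := by
  rw [pvFmtAll, List.foldl_append]
  rcases h : pvFmtAll crs == "" with _ | _ <;>
    simp_all [pvFmtAll, pvAppend]

-- main invariant: from related states, both loops (plus their final flushes) agree
lemma pvLoop_eq (compatible_versions : List String) :
    ∀ (av : List String) (crs : List (List String)) (cur : List String),
    (let s := av.foldl (pvStepB compatible_versions) (pvFmtAll crs, pvRunOf cur)
     match s.2 with
     | some r => pvAppend s.1 (pvFmtRun r)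
     | none => s.1) =
    pvFmtAll
      (let s := av.foldl
        (fun (s : List (List String) × List String) a =>
          if a ∈ compatible_versions then (s.1, s.2 ++ [a])
          else if s.2 ≠ [] then (s.1 ++ [s.2], []) else s)
        (crs, cur)
       if s.2 ≠ [] then s.1 ++ [s.2] else s.1) := by
  intro av
  induction av with
  | nil =>
    intro crs cur
    cases cur with
    | nil => simp [pvRunOf]
    | cons x xs =>
      simp [pvRunOf, pvFmtAll_concat, pvFmtList_eq_fmtRun]
  | cons a rest ih =>
    intro crs cur
    by_cases hmem : a ∈ compatible_versions
    · cases cur with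
      | nil =>
        simpa [pvStepB, pvRunOf, hmem] using ih crs [a]
      | cons x xs =>
        have : pvRunOf (x :: xs ++ [a]) = some (x, ((x :: xs).getLast (by simp), a).2) := by
          simp [pvRunOf]
        simpa [pvStepB, pvRunOf, hmem, this] using ih crs (x :: xs ++ [a])
    · cases cur with
      | nil =>
        simpa [pvStepB, pvRunOf, hmem] using ih crs []
      | cons x xs =>
        have h := ih (crs ++ [x :: xs]) []
        rw [pvFmtAll_concat, pvFmtList_eq_fmtRun] at h
        simpa [pvStepB, pvRunOf, hmem] using h

-- ===== VERDICT (by name: the statement is the Claim_ definition above) =====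
theorem create_range_spec_spec : Claim_equal_create_range_spec := by
  intro cv av _
  unfold Spec_create_range_spec create_range_spec create_range_spec_alt pvGetContinuousRanges
  by_cases h : cv.length = 0
  · simp [h]
  · have h' : (cv.length == 0) = false := by simpa using h
    simp only [h', Bool.false_eq_true, if_false]
    have := pvLoop_eq cv av [] []
    simpa [pvRunOf, pvFmtAll] using this.symm
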